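-- pv_equiv track=rewrite | github.com/dsuarezgarcia/airline_routes_problem | __main__.py | create_full_routes_dicts
-- ===== SOURCE A (Python) =====
-- def retrieve_airport_available_routes(airport, direct_routes_dict, airport_available_routes):
--
--     if airport in direct_routes_dict:
--         for dest_airport in direct_routes_dict[airport]:
--             if dest_airport not in airport_available_routes:
--                 airport_available_routes.add(dest_airport)
--                 airport_available_routes.intersection(
--                         retrieve_airport_available_routes(
--                                 dest_airport, direct_routes_dict, airport_available_routes))
--
--     return airport_available_routes
--
-- def create_full_routes_dicts(airports, direct_routes_dict,inverse_direct_routes_dict, missing_routes):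
--
--     full_routes_dict = dict()
--     inverse_full_routes_dict = dict()
--
--     for airport in airports:
--         airport_available_routes = retrieve_airport_available_routes(airport, direct_routes_dict, set())
--         if airport in airport_available_routes:
--             airport_available_routes.remove(airport)
--         full_routes_dict[airport] = airport_available_routes
--         # Calculate the full inverse routes ONLY for the missing STARTING_AIRPORT routes
--         if airport in missing_routes:
--             airport_inverse_available_routes = retrieve_airport_available_routes(
--                     airport, inverse_direct_routes_dict, set())
--             if airport in airport_inverse_available_routes:
--                 airport_inverse_available_routes.remove(airport)
--             inverse_full_routes_dict[airport] = airport_inverse_available_routes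
--
--     return (full_routes_dict, inverse_full_routes_dict)
-- ===== SOURCE B (Python) =====
-- def _reachable(source, adjacency):
--     # Iterative DFS with an explicit stack of iterators (no recursion).
--     seen = set()
--     stack = [iter(adjacency.get(source, ()))]
--     while stack:
--         dest = next(stack[-1], None)
--         if dest is None:
--             stack.pop()
--         elif dest not in seen:
--             seen.add(dest)
--             stack.append(iter(adjacency.get(dest, ())))
--     seen.discard(source)
--     return seen
--
--
-- def create_full_routes_dicts(airports, direct_routes_dict, inverse_direct_routes_dict, missing_routes):
--     full_routes_dict = {airport: _reachable(airport, direct_routes_dict)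
--                         for airport in airports}
--     inverse_full_routes_dict = {airport: _reachable(airport, inverse_direct_routes_dict)
--                                 for airport in airports if airport in missing_routes}
--     return (full_routes_dict, inverse_full_routes_dict)
-- ===== Notes on version B (the rewrite author's own statement) =====
-- stated objective: alternative
-- what changed: Per-airport reachability is computed by an iterative DFS with an explicit stack of adjacency iterators instead of A's recursive set-mutating helper, and the two result dicts are built by two comprehensions (forward for all airports, inverse only for airports in missing_routes) instead of one interleaved loop with conditional inserts.
import Mathlib
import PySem

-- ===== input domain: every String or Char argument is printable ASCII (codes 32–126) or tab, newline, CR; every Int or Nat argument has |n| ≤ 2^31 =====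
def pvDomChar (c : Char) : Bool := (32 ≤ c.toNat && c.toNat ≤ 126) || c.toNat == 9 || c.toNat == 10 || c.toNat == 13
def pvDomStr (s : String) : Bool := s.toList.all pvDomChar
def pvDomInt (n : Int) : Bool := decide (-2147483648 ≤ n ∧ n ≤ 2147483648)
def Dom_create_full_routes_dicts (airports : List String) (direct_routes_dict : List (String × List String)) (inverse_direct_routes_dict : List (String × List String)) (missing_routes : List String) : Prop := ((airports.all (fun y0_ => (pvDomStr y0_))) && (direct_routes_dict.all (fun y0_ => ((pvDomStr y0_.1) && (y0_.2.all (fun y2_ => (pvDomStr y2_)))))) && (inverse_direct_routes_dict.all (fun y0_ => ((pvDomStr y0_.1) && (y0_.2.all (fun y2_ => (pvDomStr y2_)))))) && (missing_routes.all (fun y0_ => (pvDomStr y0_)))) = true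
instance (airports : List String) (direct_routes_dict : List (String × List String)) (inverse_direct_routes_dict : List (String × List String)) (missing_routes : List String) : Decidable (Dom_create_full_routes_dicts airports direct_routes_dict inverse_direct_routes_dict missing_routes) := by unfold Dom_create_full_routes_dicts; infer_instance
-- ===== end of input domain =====

-- B replaces A's recursive set-mutating DFS helper by an iterative DFS with an explicit stack and
-- builds the two result dicts in two separate passes (alternative decomposition; no speed claim).

-- ===== PORT A =====
-- All value strings of the adjacency dict (every node the DFS can ever add to the visited set).
def pvVals (d : PySem.Dict String (List String)) : List String :=
  (d.items.map Prod.snd).flatten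

-- Fuel for the DFS loops below: a totality guard only, always sufficient (each recursive descent /
-- each visit first adds a previously unvisited element of pvVals to the set; proved below).
def pvFuel (d : PySem.Dict String (List String)) : Nat := (pvVals d).length + 1

-- retrieve_airport_available_routes: the 'for dest_airport in direct_routes_dict[airport]' loop.
-- 'if airport in dict' + 'dict[airport]' is ported as getD with default [] (an absent key makes the
-- loop body empty, exactly Python's guard).  The discarded result of '.intersection(...)' has no
-- effect in Python beyond the in-place mutation of the set by the recursive call, which is the
-- threaded state here.
def goA (d : PySem.Dict String (List String)) :
    Nat → List String → PySem.Set String → PySem.Set String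
  | _, [], s => s
  | 0, _ :: _, s => s      -- unreachable with the fuel used (fuel-sufficiency is proved below)
  | f + 1, dest :: rest, s =>
    if s.contains dest then goA d (f + 1) rest s
    else goA d (f + 1) rest (goA d f (d.getD dest []) (s.add dest))
termination_by f l _ => (f, l.length)

def retrieveA (d : PySem.Dict String (List String)) (airport : String) : PySem.Set String :=
  goA d (pvFuel d) (d.getD airport []) PySem.Set.empty

-- the loop body's 'retrieve_airport_available_routes(...)' + 'if airport in set: set.remove(airport)'
def valA (d : PySem.Dict String (List String)) (airport : String) : PySem.Set String :=
  let s0 := retrieveA d airport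
  if s0.contains airport then s0.discard airport else s0

def create_full_routes_dicts (airports : List String) (direct_routes_dict : List (String × List String)) (inverse_direct_routes_dict : List (String × List String)) (missing_routes : List String) : (List (String × List String)) × (List (String × List String)) :=
  let drd : PySem.Dict String (List String) := PySem.Dict.mk direct_routes_dict
  let idrd : PySem.Dict String (List String) := PySem.Dict.mk inverse_direct_routes_dict
  let res := airports.foldl
    (fun (acc : PySem.Dict String (List String) × PySem.Dict String (List String)) airport =>
      (acc.1.insert airport (valA drd airport),
       if missing_routes.contains airport then acc.2.insert airport (valA idrd airport)
       else acc.2))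
    (PySem.Dict.empty, PySem.Dict.empty)
  (res.1.items, res.2.items)

-- ===== PORT B =====
-- _reachable's while loop: the stack of iterators becomes a stack of remaining-suffix lists and
-- 'next(it, None)' the head/empty match on the top frame.  Fuel is a totality guard only,
-- decremented on visits, of which there are at most (pvVals d).length (proved below).
def loopB (d : PySem.Dict String (List String)) :
    Nat → List (List String) → PySem.Set String → PySem.Set String
  | _, [], s => s
  | f, [] :: stk, s => loopB d f stk s
  | f, (x :: fr) :: stk, s =>
    if s.contains x then loopB d f (fr :: stk) s
    else
      match f with
      | 0 => s      -- unreachable with the fuel used (fuel-sufficiency is proved below)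
      | f + 1 => loopB d f (d.getD x [] :: fr :: stk) (s.add x)
termination_by f stk _ => (f, (stk.map List.length).sum + stk.length)

def reachB (d : PySem.Dict String (List String)) (source : String) : PySem.Set String :=
  (loopB d (pvFuel d) [d.getD source []] PySem.Set.empty).discard source

def create_full_routes_dicts_alt (airports : List String) (direct_routes_dict : List (String × List String)) (inverse_direct_routes_dict : List (String × List String)) (missing_routes : List String) : (List (String × List String)) × (List (String × List String)) :=
  let drd : PySem.Dict String (List String) := PySem.Dict.mk direct_routes_dict
  let idrd : PySem.Dict String (List String) := PySem.Dict.mk inverse_direct_routes_dict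
  let full := airports.foldl (fun acc a => acc.insert a (reachB drd a))
    (PySem.Dict.empty : PySem.Dict String (List String))
  let inv := (airports.filter (fun a => missing_routes.contains a)).foldl
    (fun acc a => acc.insert a (reachB idrd a))
    (PySem.Dict.empty : PySem.Dict String (List String))
  (full.items, inv.items)

-- ===== PRECONDITION & SPEC =====
def Spec_create_full_routes_dicts (airports : List String) (direct_routes_dict : List (String × List String)) (inverse_direct_routes_dict : List (String × List String)) (missing_routes : List String) (out : (List (String × List String)) × (List (String × List String))) : Prop := out = create_full_routes_dicts_alt airports direct_routes_dict inverse_direct_routes_dict missing_routes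
instance (airports : List String) (direct_routes_dict : List (String × List String)) (inverse_direct_routes_dict : List (String × List String)) (missing_routes : List String) (out : (List (String × List String)) × (List (String × List String))) : Decidable (Spec_create_full_routes_dicts airports direct_routes_dict inverse_direct_routes_dict missing_routes out) := by unfold Spec_create_full_routes_dicts; infer_instance

-- ===== CLAIM (what is proved, stated in full; the proofs are below) =====
def Claim_equal_create_full_routes_dicts : Prop := ∀ (airports : List String) (direct_routes_dict : List (String × List String)) (inverse_direct_routes_dict : List (String × List String)) (missing_routes : List String), Dom_create_full_routes_dicts airports direct_routes_dict inverse_direct_routes_dict missing_routes → Spec_create_full_routes_dicts airports direct_routes_dict inverse_direct_routes_dict missing_routes (create_full_routes_dicts airports direct_routes_dict inverse_direct_routes_dict missing_routes)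

-- ===== LEMMAS AND PROOFS =====

-- Number of dict-value strings not yet in the visited set (drives all fuel-sufficiency arguments).
def pvMu (d : PySem.Dict String (List String)) (s : PySem.Set String) : Nat :=
  ((pvVals d).dedup.filter (fun x => !s.contains x)).length

-- A's DFS applied to a whole stack of pending frames (what B's explicit stack computes).
def stackA (d : PySem.Dict String (List String)) : List (List String) → PySem.Set String → PySem.Set String
  | [], s => s
  | l :: stk, s => stackA d stk (goA d (pvFuel d) l s)

theorem pvMu_le (d : PySem.Dict String (List String)) (s : PySem.Set String) :
    pvMu d s ≤ (pvVals d).length := by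
  calc pvMu d s ≤ (pvVals d).dedup.length := List.length_filter_le _ _
    _ ≤ (pvVals d).length := (List.dedup_sublist _).length_le

theorem getD_subset_vals (d : PySem.Dict String (List String)) (k : String) :
    ∀ x ∈ d.getD k [], x ∈ pvVals d := by
  intro x hx
  simp only [PySem.Dict.getD, PySem.Dict.get?] at hx
  rcases hfind : List.find? (fun p => p.1 == k) d.items with _ | p
  · rw [hfind] at hx; simp at hx
  · rw [hfind] at hx
    simp only [Option.map_some, Option.getD_some] at hx
    have hp := List.mem_of_find?_eq_some hfind
    simp only [pvVals, List.mem_flatten]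
    exact ⟨p.2, List.mem_map.2 ⟨p, hp, rfl⟩, hx⟩

theorem goA_mono (d : PySem.Dict String (List String)) (f : Nat) (l : List String)
    (s : PySem.Set String) : ∀ x ∈ s, x ∈ goA d f l s := by
  fun_induction goA d f l s with
  | case1 => intro x hx; exact hx
  | case2 => intro x hx; exact hx
  | case3 f dest rest s h ih => exact ih
  | case4 f dest rest s h ih1 ih2 =>
    intro x hx
    exact ih2 x (ih1 x (by simp [PySem.Set.mem_add, hx]))

theorem pvMu_add_lt (d : PySem.Dict String (List String)) (s : PySem.Set String) (x : String)
    (hx : x ∈ pvVals d) (hns : x ∉ s) : pvMu d (s.add x) + 1 ≤ pvMu d s := by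
  unfold pvMu
  have hadd : PySem.Set.add s x = s ++ [x] := PySem.Set.add_of_not_mem hns
  have hfe : ((pvVals d).dedup.filter (fun y => !(PySem.Set.add s x).contains y))
      = ((pvVals d).dedup.filter (fun y => !s.contains y)).filter (fun y => !(y == x)) := by
    rw [List.filter_filter]
    apply List.filter_congr
    intro y _
    simp [hadd, PySem.Set.contains, List.contains_eq_mem, beq_eq_decide, Bool.and_comm]
  rw [hfe]
  have hxmem : x ∈ (pvVals d).dedup.filter (fun y => !s.contains y) := by
    simp [List.mem_filter, List.mem_dedup, hx, PySem.Set.contains, List.contains_eq_mem, hns]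
  have : (((pvVals d).dedup.filter (fun y => !s.contains y)).filter (fun y => !(y == x))).length
      < ((pvVals d).dedup.filter (fun y => !s.contains y)).length := by
    apply List.length_filter_lt_length_iff_exists.2
    exact ⟨x, hxmem, by simp⟩
  omega

theorem pvMu_anti (d : PySem.Dict String (List String)) (s t : PySem.Set String)
    (h : ∀ x ∈ s, x ∈ t) : pvMu d t ≤ pvMu d s := by
  unfold pvMu
  apply List.Sublist.length_le
  apply List.monotone_filter_right
  intro y hy
  simp only [PySem.Set.contains, List.contains_eq_mem, Bool.not_eq_eq_eq_not, Bool.not_true,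
    decide_eq_false_iff_not] at *
  exact fun ht => hy (h y ht)

theorem goA_nil (d : PySem.Dict String (List String)) (f : Nat) (s : PySem.Set String) :
    goA d f [] s = s := by cases f <;> simp [goA]
theorem goA_fuel_irrel_aux (d : PySem.Dict String (List String)) (n : Nat) :
    ∀ (l : List String) (s : PySem.Set String) (f1 f2 : Nat),
      (∀ x ∈ l, x ∈ pvVals d) → pvMu d s ≤ n → pvMu d s < f1 → pvMu d s < f2 →
      goA d f1 l s = goA d f2 l s := by
  induction n with
  | zero =>
    intro l
    induction l with
    | nil => intro s f1 f2 _ _ _ _; rw [goA_nil, goA_nil]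
    | cons x rest ih =>
      intro s f1 f2 hl hn h1 h2
      match f1, f2 with
      | g1 + 1, g2 + 1 =>
        by_cases hx : s.contains x
        · simp only [goA, hx, if_true]
          exact ih s (g1+1) (g2+1) (fun y hy => hl y (.tail _ hy)) hn h1 h2
        · exfalso
          have hxs : x ∉ s := by simpa [PySem.Set.contains, List.contains_eq_mem] using hx
          have := pvMu_add_lt d s x (hl x (.head _)) hxs
          omega
  | succ n ihn =>
    intro l
    induction l with
    | nil => intro s f1 f2 _ _ _ _; rw [goA_nil, goA_nil]
    | cons x rest ih =>
      intro s f1 f2 hl hn h1 h2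
      match f1, f2 with
      | g1 + 1, g2 + 1 =>
        by_cases hx : s.contains x
        · simp only [goA, hx, if_true]
          exact ih s (g1+1) (g2+1) (fun y hy => hl y (.tail _ hy)) hn h1 h2
        · simp only [goA, hx, Bool.false_eq_true, if_false]
          have hxs : x ∉ s := by simpa [PySem.Set.contains, List.contains_eq_mem] using hx
          have hmu := pvMu_add_lt d s x (hl x (.head _)) hxs
          have hinner : goA d g1 (d.getD x []) (s.add x) = goA d g2 (d.getD x []) (s.add x) :=
            ihn (d.getD x []) (s.add x) g1 g2 (getD_subset_vals d x) (by omega) (by omega) (by omega)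
          rw [hinner]
          have hmu2 : pvMu d (goA d g2 (d.getD x []) (s.add x)) ≤ pvMu d (s.add x) :=
            pvMu_anti d _ _ (goA_mono d _ _ _)
          exact ihn rest _ (g1+1) (g2+1) (fun y hy => hl y (.tail _ hy))
            (by omega) (by omega) (by omega)

theorem goA_fuel_irrel (d : PySem.Dict String (List String)) (f1 f2 : Nat) (l : List String)
    (s : PySem.Set String) (hl : ∀ x ∈ l, x ∈ pvVals d)
    (h1 : pvMu d s < f1) (h2 : pvMu d s < f2) :
    goA d f1 l s = goA d f2 l s :=
  goA_fuel_irrel_aux d (pvMu d s) l s f1 f2 hl le_rfl h1 h2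

theorem loopB_eq_stackA_aux (d : PySem.Dict String (List String)) (n : Nat) :
    ∀ (stk : List (List String)) (s : PySem.Set String) (f : Nat),
      (∀ l ∈ stk, ∀ x ∈ l, x ∈ pvVals d) → pvMu d s ≤ n → pvMu d s < f →
      loopB d f stk s = stackA d stk s := by
  induction n with
  | zero =>
    intro stk
    induction stk with
    | nil => intro s f _ _ _; cases f <;> simp [loopB, stackA]
    | cons fr stk ihstk =>
      induction fr with
      | nil =>
        intro s f hstk hn hf
        have hstep : loopB d f ([] :: stk) s = loopB d f stk s := by cases f <;> simp [loopB]
        rw [hstep, ihstk s f (fun l hl => hstk l (.tail _ hl)) hn hf]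
        simp [stackA, goA_nil]
      | cons x fr ihfr =>
        intro s f hstk hn hf
        have hfr : ∀ l ∈ fr :: stk, ∀ y ∈ l, y ∈ pvVals d := by
          intro l hl
          rcases List.mem_cons.1 hl with rfl | hl
          · exact fun y hy => hstk _ (.head _) y (.tail _ hy)
          · exact hstk l (.tail _ hl)
        by_cases hx : s.contains x
        · have hstep : loopB d f ((x :: fr) :: stk) s = loopB d f (fr :: stk) s := by
            cases f <;> (simp only [loopB]; rw [if_pos hx])
          rw [hstep, ihfr s f hfr hn hf]
          have hgo : goA d (pvFuel d) (x :: fr) s = goA d (pvFuel d) fr s := by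
            simp only [pvFuel, goA, hx, if_true]
          simp only [stackA, hgo]
        · exfalso
          have hxs : x ∉ s := by simpa [PySem.Set.contains, List.contains_eq_mem] using hx
          have := pvMu_add_lt d s x (hstk (x :: fr) (.head _) x (.head _)) hxs
          omega
  | succ n ihn =>
    intro stk
    induction stk with
    | nil => intro s f _ _ _; cases f <;> simp [loopB, stackA]
    | cons fr stk ihstk =>
      induction fr with
      | nil =>
        intro s f hstk hn hf
        have hstep : loopB d f ([] :: stk) s = loopB d f stk s := by cases f <;> simp [loopB]
        rw [hstep, ihstk s f (fun l hl => hstk l (.tail _ hl)) hn hf]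
        simp [stackA, goA_nil]
      | cons x fr ihfr =>
        intro s f hstk hn hf
        have hfrV : ∀ y ∈ fr, y ∈ pvVals d := fun y hy => hstk (x :: fr) (.head _) y (.tail _ hy)
        have hfr : ∀ l ∈ fr :: stk, ∀ y ∈ l, y ∈ pvVals d := by
          intro l hl
          rcases List.mem_cons.1 hl with rfl | hl
          · exact hfrV
          · exact hstk l (.tail _ hl)
        by_cases hx : s.contains x
        · have hstep : loopB d f ((x :: fr) :: stk) s = loopB d f (fr :: stk) s := by
            cases f <;> (simp only [loopB]; rw [if_pos hx])
          rw [hstep, ihfr s f hfr hn hf]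
          have hgo : goA d (pvFuel d) (x :: fr) s = goA d (pvFuel d) fr s := by
            simp only [pvFuel, goA, hx, if_true]
          simp only [stackA, hgo]
        · have hxv : x ∈ pvVals d := hstk (x :: fr) (.head _) x (.head _)
          have hxs : x ∉ s := by simpa [PySem.Set.contains, List.contains_eq_mem] using hx
          have hmu := pvMu_add_lt d s x hxv hxs
          match f, hf with
          | g + 1, _ =>
            have hstep : loopB d (g+1) ((x :: fr) :: stk) s
                = loopB d g (d.getD x [] :: fr :: stk) (s.add x) := by
              simp only [loopB]; rw [if_neg hx]
            have hpush : ∀ l ∈ d.getD x [] :: fr :: stk, ∀ y ∈ l, y ∈ pvVals d := by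
              intro l hl
              rcases List.mem_cons.1 hl with rfl | hl
              · exact getD_subset_vals d x
              · exact hfr l hl
            rw [hstep, ihn (d.getD x [] :: fr :: stk) (s.add x) g hpush (by omega) (by omega)]
            have hfi : goA d ((pvVals d).length) (d.getD x []) (s.add x)
                = goA d (pvFuel d) (d.getD x []) (s.add x) :=
              goA_fuel_irrel d _ _ _ _ (getD_subset_vals d x)
                (by have := pvMu_le d s; omega)
                (by have := pvMu_le d (s.add x); simp only [pvFuel]; omega)
            have hgo : goA d (pvFuel d) (x :: fr) s
                = goA d (pvFuel d) fr (goA d (pvFuel d) (d.getD x []) (s.add x)) := by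
              simp only [pvFuel, goA, hx, Bool.false_eq_true, if_false]
              rw [show goA d ((pvVals d).length) (d.getD x []) (s.add x)
                    = goA d ((pvVals d).length + 1) (d.getD x []) (s.add x) by
                  simpa [pvFuel] using hfi]
            simp only [stackA, hgo]

theorem reachB_eq_valA (d : PySem.Dict String (List String)) (a : String) :
    reachB d a = valA d a := by
  unfold reachB valA retrieveA
  have hsingle : loopB d (pvFuel d) [d.getD a []] PySem.Set.empty
      = goA d (pvFuel d) (d.getD a []) PySem.Set.empty := by
    rw [loopB_eq_stackA_aux d (pvMu d PySem.Set.empty) [d.getD a []] PySem.Set.empty (pvFuel d)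
      (by intro l hl y hy
          rcases List.mem_cons.1 hl with rfl | hl
          · exact getD_subset_vals d a y hy
          · simp at hl)
      le_rfl
      (by have := pvMu_le d PySem.Set.empty; simp only [pvFuel]; omega)]
    simp [stackA]
  rw [hsingle]
  by_cases h : (goA d (pvFuel d) (d.getD a []) PySem.Set.empty).contains a
  · rw [if_pos h]
  · rw [if_neg h]
    have hns : a ∉ goA d (pvFuel d) (d.getD a []) PySem.Set.empty := by
      simpa [PySem.Set.contains, List.contains_eq_mem] using h
    simp only [PySem.Set.discard]
    apply List.filter_eq_self.2
    intro y hy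
    have hne : y ≠ a := fun hya => hns (hya ▸ hy)
    simp [hne]

theorem fold_pair (drd idrd : PySem.Dict String (List String)) (missing : List String) :
    ∀ (aps : List String) (acc : PySem.Dict String (List String) × PySem.Dict String (List String)),
      aps.foldl
        (fun acc airport =>
          (acc.1.insert airport (valA drd airport),
           if missing.contains airport then acc.2.insert airport (valA idrd airport)
           else acc.2)) acc
      = (aps.foldl (fun a1 a => a1.insert a (reachB drd a)) acc.1,
         (aps.filter (fun a => missing.contains a)).foldl
           (fun a2 a => a2.insert a (reachB idrd a)) acc.2) := by
  intro aps
  induction aps with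
  | nil => intro acc; rfl
  | cons a aps ih =>
    intro acc
    simp only [List.foldl_cons, List.filter_cons]
    by_cases hm : missing.contains a
    · simp only [hm, if_true, List.foldl_cons, ih, reachB_eq_valA]
    · simp only [hm, Bool.false_eq_true, if_false, ih, reachB_eq_valA]

-- ===== VERDICT (by name: the statement is the Claim_ definition above) =====
theorem create_full_routes_dicts_spec : Claim_equal_create_full_routes_dicts := by
  intro airports direct_routes_dict inverse_direct_routes_dict missing_routes _
  show create_full_routes_dicts _ _ _ _ = create_full_routes_dicts_alt _ _ _ _
  simp only [create_full_routes_dicts, create_full_routes_dicts_alt]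
  rw [fold_pair]
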